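-- pv_equiv track=rewrite | github.com/biswajitKalita/mindpulse | mindpulse/Notebooks/2_goemotion_training.py | risk_map
-- ===== SOURCE A (Python) =====
-- def risk_map(e):
--     high=["grief","remorse","sadness","fear","nervousness"]
--     if any(x in high for x in e):
--         return "high"
--     med=["anger","annoyance","disgust"]
--     if any(x in med for x in e):
--         return "moderate"
--     return "low"
-- ===== SOURCE B (Python) =====
-- def risk_map(e):
--     high=["grief","remorse","sadness","fear","nervousness"]
--     med=["anger","annoyance","disgust"]
--     found_med=False
--     for x in e:
--         if x in high:
--             return "high"
--         elif x in med:
--             found_med=True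
--     return "moderate" if found_med else "low"
-- ===== Notes on version B (the rewrite author's own statement) =====
-- stated objective: alternative
-- what changed: Single pass over e with early return and a found_med flag, instead of two separate any() scans over the whole list.
import Mathlib
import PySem

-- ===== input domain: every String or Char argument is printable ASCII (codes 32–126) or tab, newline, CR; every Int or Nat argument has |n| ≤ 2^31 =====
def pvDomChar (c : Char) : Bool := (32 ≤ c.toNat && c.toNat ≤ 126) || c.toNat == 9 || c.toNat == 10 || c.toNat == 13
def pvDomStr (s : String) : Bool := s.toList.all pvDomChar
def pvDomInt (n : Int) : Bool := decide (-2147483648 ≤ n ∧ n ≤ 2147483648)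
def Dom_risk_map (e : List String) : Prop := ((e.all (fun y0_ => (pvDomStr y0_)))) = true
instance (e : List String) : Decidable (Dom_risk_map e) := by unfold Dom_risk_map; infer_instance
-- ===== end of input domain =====

-- B makes a single pass with an early return and a found_med flag instead of A's two any() scans; same cost, different decomposition.

-- ===== PORT A =====
def risk_map (e : List String) : String :=
  let high := ["grief", "remorse", "sadness", "fear", "nervousness"]
  if e.any (fun x => high.contains x) then "high"
  else
    let med := ["anger", "annoyance", "disgust"]
    if e.any (fun x => med.contains x) then "moderate"
    else "low"

-- ===== PORT B =====
def riskLoop : List String → Bool → String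
  | [], foundMed => if foundMed then "moderate" else "low"
  | x :: rest, foundMed =>
    if ["grief", "remorse", "sadness", "fear", "nervousness"].contains x then "high"
    else if ["anger", "annoyance", "disgust"].contains x then riskLoop rest true
    else riskLoop rest foundMed

def risk_map_alt (e : List String) : String := riskLoop e false

-- ===== PRECONDITION & SPEC =====
def Spec_risk_map (e : List String) (out : String) : Prop := out = risk_map_alt e
instance (e : List String) (out : String) : Decidable (Spec_risk_map e out) := by unfold Spec_risk_map; infer_instance

-- ===== CLAIM (what is proved, stated in full; the proofs are below) =====
def Claim_equal_risk_map : Prop := ∀ (e : List String), Dom_risk_map e → Spec_risk_map e (risk_map e)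

-- ===== LEMMAS AND PROOFS =====
lemma riskLoop_eq (e : List String) (fm : Bool) :
    riskLoop e fm =
      (if e.any (fun x => (["grief", "remorse", "sadness", "fear", "nervousness"] : List String).contains x) then "high"
       else if fm || e.any (fun x => (["anger", "annoyance", "disgust"] : List String).contains x) then "moderate"
       else "low") := by
  induction e generalizing fm with
  | nil => simp [riskLoop]
  | cons x rest ih =>
    simp only [riskLoop, List.any_cons]
    by_cases hh : (["grief", "remorse", "sadness", "fear", "nervousness"] : List String).contains x
    all_goals by_cases hm : (["anger", "annoyance", "disgust"] : List String).contains x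
    all_goals simp at hh hm
    all_goals simp [hh, hm, ih]

-- ===== VERDICT (by name: the statement is the Claim_ definition above) =====
theorem risk_map_spec : Claim_equal_risk_map := by
  intro e _
  unfold Spec_risk_map risk_map risk_map_alt
  rw [riskLoop_eq]
  simp
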